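-- pv_equiv track=rewrite | github.com/swicklespencer-a/BrandeisSyllabusProject | convert_to_sentences.py | get_line_offsets
-- ===== SOURCE A (Python) =====
-- def get_line_offsets(text):
--     """
--     Split text on '\\n' and return a list of (char_start, char_end, line_text)
--     for every non-empty line (after stripping).
--
--     char_start / char_end are offsets into the original text string.
--     """
--     lines = []
--     pos = 0
--     for raw_line in text.split("\n"):
--         line_start = pos
--         line_end = pos + len(raw_line)
--         stripped = raw_line.strip()
--         if stripped:
--             lines.append((line_start, line_end, stripped))
--         pos = line_end + 1  # +1 for the '\n' character itself
--     return lines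
-- ===== SOURCE B (Python) =====
-- import re
--
-- def get_line_offsets(text):
--     lines = []
--     for m in re.finditer(r"[^\n]+", text):
--         stripped = m.group().strip()
--         if stripped:
--             lines.append((m.start(), m.end(), stripped))
--     return lines
-- ===== Notes on version B (the rewrite author's own statement) =====
-- stated objective: idiomatic
-- what changed: Replaces newline-split plus a manually maintained running offset counter with a regex scan over maximal non-newline runs (re.finditer), taking offsets directly from the match spans; empty segments never appear and no position bookkeeping is carried across iterations.
import Mathlib
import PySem

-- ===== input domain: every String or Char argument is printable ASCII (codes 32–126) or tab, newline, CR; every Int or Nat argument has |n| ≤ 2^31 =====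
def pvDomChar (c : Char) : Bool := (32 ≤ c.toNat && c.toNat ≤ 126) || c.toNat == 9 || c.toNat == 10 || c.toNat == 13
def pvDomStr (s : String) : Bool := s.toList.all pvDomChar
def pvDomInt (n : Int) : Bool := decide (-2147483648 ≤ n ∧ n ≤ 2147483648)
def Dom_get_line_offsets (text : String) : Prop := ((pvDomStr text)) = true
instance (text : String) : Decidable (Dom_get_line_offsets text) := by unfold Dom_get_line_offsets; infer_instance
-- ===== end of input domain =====

-- B replaces the newline-split + running offset counter by a regex-style scan over maximal
-- non-newline runs, reading offsets off the match spans (idiomatic; same O(n) cost).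


-- ===== PORT A =====
-- the loop body of A: state = (lines, pos); appends (line_start, line_end, stripped) when stripped is non-empty
def aStep (st : List (Int × Int × String) × Int) (raw : List Char) : List (Int × Int × String) × Int :=
  let line_start := st.2
  let line_end := st.2 + (raw.length : Int)
  let stripped := PySem.Chars.strip raw
  (if stripped ≠ [] then st.1 ++ [(line_start, line_end, String.mk stripped)] else st.1,
   line_end + 1)

def get_line_offsets (text : String) : List (Int × Int × String) :=
  ((PySem.Chars.splitOn text.toList ['\n']).foldl aStep ([], 0)).1

-- ===== PORT B =====
-- hand port of B's regex scan: re.finditer(r"[^\n]+", text) yields exactly the maximal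
-- runs of non-newline characters with their (start, end) spans; exact on this pattern.
def altGo (cs : List Char) (i : Nat) : List (Int × Int × String) :=
  match cs with
  | [] => []
  | c :: rest =>
    if c = '\n' then altGo rest (i + 1)
    else
      -- the match m: run of non-newline chars starting at index i
      let run := (c :: rest).takeWhile (fun x => x ≠ '\n')
      let stripped := PySem.Chars.strip run
      let tail := altGo ((c :: rest).dropWhile (fun x => x ≠ '\n')) (i + run.length)
      if stripped ≠ [] then ((i : Int), ((i + run.length : Nat) : Int), String.mk stripped) :: tail
      else tail
termination_by cs.length
decreasing_by
  · simp
  · rename_i hc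
    have h1 := List.length_dropWhile_le (fun x => decide (x ≠ '\n')) rest
    simp [hc]
    simp at h1
    omega

def get_line_offsets_alt (text : String) : List (Int × Int × String) :=
  altGo text.toList 0

-- ===== PRECONDITION & SPEC =====
def Spec_get_line_offsets (text : String) (out : List (Int × Int × String)) : Prop := out = get_line_offsets_alt text
instance (text : String) (out : List (Int × Int × String)) : Decidable (Spec_get_line_offsets text out) := by unfold Spec_get_line_offsets; infer_instance

-- ===== CLAIM (what is proved, stated in full; the proofs are below) =====
def Claim_equal_get_line_offsets : Prop := ∀ (text : String), Dom_get_line_offsets text → Spec_get_line_offsets text (get_line_offsets text)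

-- ===== LEMMAS AND PROOFS =====

-- simple structural characterisation of text.split("\n")
def spNl (cs : List Char) : List (List Char) :=
  cs.takeWhile (fun x => x ≠ '\n') ::
    (if h : cs.dropWhile (fun x => x ≠ '\n') = [] then []
     else spNl ((cs.dropWhile (fun x => x ≠ '\n')).tail))
termination_by cs.length
decreasing_by
  have h1 := List.length_dropWhile_le (fun x => decide (x ≠ '\n')) cs
  have h2 : 0 < (cs.dropWhile (fun x => x ≠ '\n')).length := List.length_pos_iff.mpr h
  rw [List.length_tail]
  omega

lemma spNl_eq (cs : List Char) : spNl cs =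
    cs.takeWhile (fun x => x ≠ '\n') ::
      (if cs.dropWhile (fun x => x ≠ '\n') = [] then []
       else spNl ((cs.dropWhile (fun x => x ≠ '\n')).tail)) := by
  rw [spNl.eq_def]
  simp only [dite_eq_ite]

lemma spNl_nil : spNl [] = [[]] := by rw [spNl_eq]; simp

lemma spNl_cons_nl (rest : List Char) : spNl ('\n' :: rest) = [] :: spNl rest := by
  rw [spNl_eq]
  simp [List.takeWhile_cons, List.dropWhile_cons]

lemma spNl_cons_ne (c : Char) (rest : List Char) (hc : c ≠ '\n') :
    spNl (c :: rest) = (c :: List.takeWhile (fun x => x ≠ '\n') rest) ::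
      (if rest.dropWhile (fun x => x ≠ '\n') = [] then []
       else spNl ((rest.dropWhile (fun x => x ≠ '\n')).tail)) := by
  rw [spNl_eq]
  simp [List.takeWhile_cons, List.dropWhile_cons, hc]

lemma dropWhile_head_not (p : Char → Bool) : ∀ (l : List Char) (x : Char) (r : List Char),
    l.dropWhile p = x :: r → p x = false := by
  intro l
  induction l with
  | nil => intro x r h; simp at h
  | cons a t ih =>
    intro x r h
    rw [List.dropWhile_cons] at h
    by_cases ha : p a = true
    · exact ih x r (by simpa [ha] using h)
    · have hax : a = x := by
        simpa [ha] using congrArg (fun l => l.head?) h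
      rw [← hax]
      simpa using ha

lemma strip_nil : PySem.Chars.strip ([] : List Char) = [] := by decide

lemma go_spec (fuel : Nat) (l cur : List Char) (acc : List (List Char)) (h : l.length ≤ fuel) :
    PySem.Chars.splitOn.go ['\n'] fuel l cur acc =
      acc.reverse ++ (cur.reverse ++ l.takeWhile (fun x => x ≠ '\n')) ::
        (if l.dropWhile (fun x => x ≠ '\n') = [] then []
         else spNl ((l.dropWhile (fun x => x ≠ '\n')).tail)) := by
  induction fuel generalizing l cur acc with
  | zero =>
    have hl : l = [] := List.length_eq_zero_iff.mp (Nat.le_zero.mp h)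
    subst hl
    simp [PySem.Chars.splitOn.go]
  | succ m ih =>
    match l with
    | [] => simp [PySem.Chars.splitOn.go]
    | c :: rest =>
      by_cases hc : c = '\n'
      · subst hc
        have hpre : (['\n'] : List Char).isPrefixOf ('\n' :: rest) = true := by
          simp [List.isPrefixOf]
        rw [PySem.Chars.splitOn.go]
        simp only [hpre, if_pos]
        rw [show List.drop (['\n'] : List Char).length ('\n' :: rest) = rest from rfl]
        rw [ih rest [] (cur.reverse :: acc) (by simpa using h)]
        have htk0 : List.takeWhile (fun x => x ≠ '\n') ('\n' :: rest) = [] := by simp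
        have hdw0 : List.dropWhile (fun x => x ≠ '\n') ('\n' :: rest) = '\n' :: rest := by simp
        rw [htk0, hdw0, if_neg (by simp : ¬(('\n' :: rest : List Char) = [])),
          show (('\n' :: rest : List Char)).tail = rest from rfl, spNl_eq rest]
        simp
      · have hpre : (['\n'] : List Char).isPrefixOf (c :: rest) = false := by
          simp [List.isPrefixOf]
          exact fun hcc => hc hcc.symm
        rw [PySem.Chars.splitOn.go]
        simp only [hpre, Bool.false_eq_true, if_neg, not_false_iff]
        rw [ih rest (c :: cur) acc (by simpa using h)]
        have htk1 : List.takeWhile (fun x => x ≠ '\n') (c :: rest)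
            = c :: List.takeWhile (fun x => x ≠ '\n') rest := by
          simp [List.takeWhile_cons, hc]
        have hdw1 : List.dropWhile (fun x => x ≠ '\n') (c :: rest)
            = List.dropWhile (fun x => x ≠ '\n') rest := by
          simp [List.dropWhile_cons, hc]
        rw [htk1, hdw1]
        simp

lemma splitOn_eq_spNl (cs : List Char) : PySem.Chars.splitOn cs ['\n'] = spNl cs := by
  rw [PySem.Chars.splitOn, go_spec (cs.length + 1) cs [] [] (by omega), spNl_eq cs]
  simp

-- recursive characterisation of A's fold
def aRec : List (List Char) → Int → List (Int × Int × String)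
  | [], _ => []
  | raw :: rest, pos =>
    (if PySem.Chars.strip raw ≠ [] then
        [(pos, pos + (raw.length : Int), String.mk (PySem.Chars.strip raw))]
      else []) ++ aRec rest (pos + (raw.length : Int) + 1)

lemma foldA (segs : List (List Char)) (acc : List (Int × Int × String)) (pos : Int) :
    (segs.foldl aStep (acc, pos)).1 = acc ++ aRec segs pos := by
  induction segs generalizing acc pos with
  | nil => simp [aRec]
  | cons raw rest ih =>
    have hstep : aStep (acc, pos) raw =
        ((if PySem.Chars.strip raw ≠ [] then
            acc ++ [(pos, pos + (raw.length : Int), String.mk (PySem.Chars.strip raw))]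
          else acc), pos + (raw.length : Int) + 1) := rfl
    rw [List.foldl_cons, hstep, ih]
    by_cases hs : PySem.Chars.strip raw = []
    · simp [aRec, hs]
    · simp [aRec, hs]

lemma altGo_eq_aRec (n : Nat) : ∀ (cs : List Char), cs.length ≤ n → ∀ (i : Nat),
    altGo cs i = aRec (spNl cs) (i : Int) := by
  induction n with
  | zero =>
    intro cs h i
    have hcs : cs = [] := List.length_eq_zero_iff.mp (Nat.le_zero.mp h)
    subst hcs
    rw [altGo, spNl_nil]
    simp [aRec, strip_nil]
  | succ m ih =>
    intro cs h i
    match cs with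
    | [] =>
      rw [altGo, spNl_nil]
      simp [aRec, strip_nil]
    | c :: rest =>
      by_cases hc : c = '\n'
      · subst hc
        rw [altGo]
        simp only [if_pos rfl]
        rw [ih rest (by simpa using h) (i + 1), spNl_cons_nl rest]
        rw [show aRec ([] :: spNl rest) (i : Int) =
              ([] ++ aRec (spNl rest) ((i : Int) + (([] : List Char).length : Int) + 1)) from by
            rw [aRec]; simp [strip_nil]]
        simp only [List.nil_append, List.length_nil, Int.natCast_zero]
        congr 1 <;> (push_cast ; ring)
      · rw [altGo]
        simp only [if_neg hc]
        rw [spNl_cons_ne c rest hc]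
        have htk : List.takeWhile (fun x => x ≠ '\n') (c :: rest)
            = c :: List.takeWhile (fun x => x ≠ '\n') rest := by
          simp [List.takeWhile_cons, hc]
        have hdwc : List.dropWhile (fun x => x ≠ '\n') (c :: rest)
            = List.dropWhile (fun x => x ≠ '\n') rest := by
          simp [List.dropWhile_cons, hc]
        have hlen : (List.dropWhile (fun x => x ≠ '\n') rest).length ≤ m := by
          have := List.length_dropWhile_le (fun x => decide (x ≠ '\n')) rest
          have hr : rest.length ≤ m := by simpa using h
          omega
        rw [htk, hdwc]
        cases hdw : List.dropWhile (fun x => x ≠ '\n') rest with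
        | nil =>
          rw [if_pos rfl]
          by_cases hs : PySem.Chars.strip (c :: List.takeWhile (fun x => x ≠ '\n') rest) = []
          · simp [hs, altGo, aRec]
          · simp [hs, altGo, aRec]
        | cons x r =>
          have hx : x = '\n' := by
            have hnot := dropWhile_head_not (fun x => decide (x ≠ '\n')) rest x r hdw
            simpa using hnot
          subst hx
          have hrlen : r.length ≤ m := by
            have : (List.dropWhile (fun x => x ≠ '\n') rest).length = r.length + 1 := by
              rw [hdw]; simp
            omega
          rw [if_neg (show ¬(('\n' :: r : List Char) = []) by simp),
            show (('\n' :: r : List Char)).tail = r from rfl]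
          rw [show altGo ('\n' :: r) (i + (c :: List.takeWhile (fun x => x ≠ '\n') rest).length)
                = altGo r (i + (c :: List.takeWhile (fun x => x ≠ '\n') rest).length + 1) from by
            rw [altGo]; simp]
          rw [ih r hrlen (i + (c :: List.takeWhile (fun x => x ≠ '\n') rest).length + 1)]
          simp [aRec]
          split_ifs <;> simp

-- ===== VERDICT (by name: the statement is the Claim_ definition above) =====
theorem get_line_offsets_spec : Claim_equal_get_line_offsets := by
  intro text _
  unfold Spec_get_line_offsets get_line_offsets get_line_offsets_alt
  rw [splitOn_eq_spNl, foldA, altGo_eq_aRec text.toList.length text.toList le_rfl 0]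
  simp
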